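-- pv_equiv track=rewrite | github.com/eliottcassidy2000/math | 04-computation/pi_transfer_89c.py | paley_tournament
-- ===== SOURCE A (Python) =====
-- def paley_tournament(p):
--     qr = set()
--     for a in range(1, p):
--         qr.add((a*a) % p)
--     adj = [[] for _ in range(p)]
--     for i in range(p):
--         for j in range(p):
--             if i != j and (j - i) % p in qr:
--                 adj[i].append(j)
--     return adj, qr
-- ===== SOURCE B (Python) =====
-- def paley_tournament(p):
--     qr = set()
--     for a in range(1, p // 2 + 1):
--         qr.add((a * a) % p)
--     base = sorted(d for d in qr if d != 0)
--     adj = [[d + i - p for d in base if d >= p - i] + [d + i for d in base if d < p - i]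
--            for i in range(p)]
--     return adj, qr
-- ===== Notes on version B (the rewrite author's own statement) =====
-- stated objective: alternative
-- what changed: B builds the residue set only from the lower half of the bases (squares repeat under the symmetry a <-> p-a), sorts the nonzero residues once into a base list, and emits each adjacency row as the wrapped shifts (d+i-p for d >= p-i) concatenated with the unwrapped shifts (d+i for d < p-i), instead of testing membership of (j-i)%p for every ordered pair (i,j).
import Mathlib
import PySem

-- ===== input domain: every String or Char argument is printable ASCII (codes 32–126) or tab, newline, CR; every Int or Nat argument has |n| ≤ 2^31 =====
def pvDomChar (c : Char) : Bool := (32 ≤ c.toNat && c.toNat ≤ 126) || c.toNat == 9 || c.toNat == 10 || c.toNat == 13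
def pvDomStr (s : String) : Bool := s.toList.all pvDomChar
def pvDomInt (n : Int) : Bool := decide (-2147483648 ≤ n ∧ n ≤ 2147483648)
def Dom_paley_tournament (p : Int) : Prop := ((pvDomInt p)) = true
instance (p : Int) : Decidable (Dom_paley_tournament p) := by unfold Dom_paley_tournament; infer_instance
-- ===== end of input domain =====

-- B builds the residue set only from the lower half of the bases (squares repeat by the a ↦ p-a symmetry),
-- sorts the nonzero residues once into `base`, and emits each row as the wrapped shifts
-- (d+i-p for d ≥ p-i) followed by the unwrapped shifts (d+i for d < p-i) — no per-pair
-- membership test and no per-row sort; objective: alternative.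

-- ===== PORT A =====
def paley_tournament (p : Int) : List (List Int) × List Int :=
  let qr : PySem.Set Int :=
    (PySem.List.pyRange 1 p 1).foldl
      (fun s a => PySem.Set.add s (PySem.Int.mod (a * a) p)) PySem.Set.empty
  let adj : List (List Int) := (PySem.List.pyRange 0 p 1).map (fun _ => [])
  let adj :=
    (PySem.List.pyRange 0 p 1).foldl (fun adj i =>
      (PySem.List.pyRange 0 p 1).foldl (fun adj j =>
        if i != j && PySem.Set.contains qr (PySem.Int.mod (j - i) p) then
          PySem.List.pySetD adj i (PySem.List.pyGetD adj i [] ++ [j])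
        else adj) adj) adj
  (adj, qr)

-- ===== PORT B =====
def paley_tournament_alt (p : Int) : List (List Int) × List Int :=
  let qr : PySem.Set Int :=
    (PySem.List.pyRange 1 (PySem.Int.floordiv p 2 + 1) 1).foldl
      (fun s a => PySem.Set.add s (PySem.Int.mod (a * a) p)) PySem.Set.empty
  let base : List Int :=
    PySem.List.sorted (qr.filter (fun d => d != 0)) (fun x => x) false
  let adj : List (List Int) :=
    (PySem.List.pyRange 0 p 1).map (fun i =>
      (base.filter (fun d => decide (p - i ≤ d))).map (fun d => d + i - p) ++
      (base.filter (fun d => decide (d < p - i))).map (fun d => d + i))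
  (adj, qr)

-- ===== PRECONDITION & SPEC =====
def Spec_paley_tournament (p : Int) (out : List (List Int) × List Int) : Prop := out = paley_tournament_alt p
instance (p : Int) (out : List (List Int) × List Int) : Decidable (Spec_paley_tournament p out) := by unfold Spec_paley_tournament; infer_instance

-- ===== CLAIM (what is proved, stated in full; the proofs are below) =====
def Claim_equal_paley_tournament : Prop := ∀ (p : Int), Dom_paley_tournament p → Spec_paley_tournament p (paley_tournament p)

-- ===== LEMMAS AND PROOFS =====

-- Proof-side names for the pieces of the two ports
def pvQr (p : Int) : List Int :=
  (PySem.List.pyRange 1 p 1).foldl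
    (fun s a => PySem.Set.add s (PySem.Int.mod (a * a) p)) PySem.Set.empty

def pvQrB (p : Int) : List Int :=
  (PySem.List.pyRange 1 (PySem.Int.floordiv p 2 + 1) 1).foldl
    (fun s a => PySem.Set.add s (PySem.Int.mod (a * a) p)) PySem.Set.empty

def pvCond (p i j : Int) : Bool :=
  i != j && PySem.Set.contains (pvQr p) (PySem.Int.mod (j - i) p)

def pvRow (p i : Int) : List Int :=
  (PySem.List.pyRange 0 p 1).filter (fun j => pvCond p i j)

def pvBase (p : Int) : List Int :=
  PySem.List.sorted ((pvQr p).filter (fun d => d != 0)) (fun x => x) false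

def pvBaseB (p : Int) : List Int :=
  PySem.List.sorted ((pvQrB p).filter (fun d => d != 0)) (fun x => x) false

def pvRowB (p i : Int) : List Int :=
  ((pvBaseB p).filter (fun d => decide (p - i ≤ d))).map (fun d => d + i - p) ++
  ((pvBaseB p).filter (fun d => decide (d < p - i))).map (fun d => d + i)

def pvAdjA (p : Int) : List (List Int) :=
  (PySem.List.pyRange 0 p 1).foldl (fun adj i =>
    (PySem.List.pyRange 0 p 1).foldl (fun adj j =>
      if pvCond p i j then
        PySem.List.pySetD adj i (PySem.List.pyGetD adj i [] ++ [j])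
      else adj) adj) ((PySem.List.pyRange 0 p 1).map (fun _ => []))

lemma pvA_unfold (p : Int) : paley_tournament p = (pvAdjA p, pvQr p) := rfl

lemma pvB_unfold (p : Int) :
    paley_tournament_alt p = ((PySem.List.pyRange 0 p 1).map (fun i => pvRowB p i), pvQrB p) := rfl

lemma pvQr_eq_ofList (p : Int) :
    pvQr p = PySem.Set.ofList ((PySem.List.pyRange 1 p 1).map (fun a => PySem.Int.mod (a * a) p)) := by
  rw [PySem.Set.ofList_eq_foldl, List.foldl_map]
  rfl

lemma pvQrB_eq_ofList (p : Int) :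
    pvQrB p = PySem.Set.ofList ((PySem.List.pyRange 1 (PySem.Int.floordiv p 2 + 1) 1).map
      (fun a => PySem.Int.mod (a * a) p)) := by
  rw [PySem.Set.ofList_eq_foldl, List.foldl_map]
  rfl

lemma pvAdd_of_mem {s : List Int} {x : Int} (h : x ∈ s) : PySem.Set.add s x = s := by
  simp [PySem.Set.add, h]

lemma pvUpdate_of_subset (s : List Int) (l : List Int) (h : ∀ x ∈ l, x ∈ s) :
    PySem.Set.update s l = s := by
  induction l generalizing s with
  | nil => rfl
  | cons x l ih =>
    rw [PySem.Set.update_cons, pvAdd_of_mem (h x List.mem_cons_self)]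
    exact ih s (fun y hy => h y (List.mem_cons_of_mem _ hy))

-- squares repeat beyond p//2: (p-a)² ≡ a² (mod p)
lemma pvSquareSym (p a : Int) (hp : 0 < p) :
    PySem.Int.mod ((p - a) * (p - a)) p = PySem.Int.mod (a * a) p := by
  rw [PySem.Int.mod_eq_emod_of_pos hp, PySem.Int.mod_eq_emod_of_pos hp]
  have h : (p - a) * (p - a) = a * a + p * (p - 2 * a) := by ring
  rw [h, Int.add_mul_emod_self_left]

-- the half-range loop of B builds the same residue list as A's full loop
lemma pvQrB_eq (p : Int) : pvQrB p = pvQr p := by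
  rw [pvQr_eq_ofList, pvQrB_eq_ofList]
  by_cases hp : p ≤ 1
  · have h2 : PySem.Int.floordiv p 2 + 1 ≤ 1 := by
      rw [PySem.Int.floordiv_eq_ediv_of_pos (by omega : (0:Int) < 2)]; omega
    rw [PySem.List.pyRange_one_eq_nil hp, PySem.List.pyRange_one_eq_nil h2]
  · replace hp : 1 < p := by omega
    set m : Int := PySem.Int.floordiv p 2 + 1 with hm
    have hm2 : m = p / 2 + 1 := by
      rw [hm, PySem.Int.floordiv_eq_ediv_of_pos (by omega : (0:Int) < 2)]
    have hsplit : PySem.List.pyRange 1 p 1 =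
        PySem.List.pyRange 1 m 1 ++ PySem.List.pyRange m p 1 :=
      PySem.List.pyRange_one_append 1 m p (by omega) (by omega)
    rw [hsplit, List.map_append, PySem.Set.ofList_append]
    refine (pvUpdate_of_subset _ _ ?_).symm
    intro x hx
    obtain ⟨a, ha, rfl⟩ := List.mem_map.mp hx
    rw [PySem.List.mem_pyRange_one] at ha
    rw [PySem.Set.mem_ofList]
    refine List.mem_map.mpr ⟨p - a, ?_, pvSquareSym p a (by omega)⟩
    rw [PySem.List.mem_pyRange_one]
    omega

lemma pvQr_nodup (p : Int) : (pvQr p).Nodup := by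
  rw [pvQr_eq_ofList]; exact PySem.Set.nodup_ofList _

lemma pvQr_bounds (p : Int) (hp : 0 < p) (d : Int) (hd : d ∈ pvQr p) : 0 ≤ d ∧ d < p := by
  rw [pvQr_eq_ofList, PySem.Set.mem_ofList] at hd
  obtain ⟨a, -, rfl⟩ := List.mem_map.mp hd
  exact ⟨PySem.Int.mod_nonneg _ hp, PySem.Int.mod_lt _ hp⟩

-- inverse of the shift d ↦ (i+d) % p on [0, p)
lemma pvInv (p i d : Int) (hp : 0 < p) (h0 : 0 ≤ d) (h1 : d < p) :
    PySem.Int.mod (PySem.Int.mod (i + d) p - i) p = d := by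
  rw [PySem.Int.mod_eq_emod_of_pos hp, PySem.Int.mod_eq_emod_of_pos hp]
  have h2 : ((i + d) % p - i) % p = ((i + d) - i) % p := by
    conv_lhs => rw [Int.sub_emod]
    conv_rhs => rw [Int.sub_emod]
    rw [Int.emod_emod_of_dvd _ dvd_rfl]
  rw [h2]
  simp only [add_sub_cancel_left]
  exact Int.emod_eq_of_lt h0 h1

lemma pvZeroIff (p i x : Int) (hp : 0 < p) (hx0 : 0 ≤ x) (hx1 : x < p)
    (hi0 : 0 ≤ i) (hi1 : i < p) : PySem.Int.mod (x - i) p = 0 ↔ x = i := by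
  rw [PySem.Int.mod_eq_emod_of_pos hp]
  rcases le_or_gt i x with h | h
  · rw [Int.emod_eq_of_lt (by omega) (by omega)]; omega
  · have h3 : (x - i) % p = (x - i + p * 1) % p := by rw [Int.add_mul_emod_self_left]
    rw [h3, Int.emod_eq_of_lt (by omega) (by omega)]; omega

lemma pvFwd (p i x : Int) (hp : 0 < p) (hx0 : 0 ≤ x) (hx1 : x < p) :
    PySem.Int.mod (i + PySem.Int.mod (x - i) p) p = x := by
  rw [PySem.Int.mod_eq_emod_of_pos hp, PySem.Int.mod_eq_emod_of_pos hp]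
  have h2 : (i + (x - i) % p) % p = (i + (x - i)) % p := by
    conv_lhs => rw [Int.add_emod]
    conv_rhs => rw [Int.add_emod]
    rw [Int.emod_emod_of_dvd _ dvd_rfl]
  rw [h2]
  simp only [add_sub_cancel]
  exact Int.emod_eq_of_lt hx0 hx1

-- the sorted shifted-residue list is A's ascending filter row
lemma pvSortedRow_eq (p i : Int) (hp : 0 < p) (hi0 : 0 ≤ i) (hi1 : i < p) :
    PySem.List.sorted
      ((((pvQr p).filter (fun d => d != 0)).map (fun d => PySem.Int.mod (i + d) p)))
      (fun x => x) false = pvRow p i := by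
  unfold pvRow
  apply PySem.List.sorted_eq_of_perm_of_pairwise_lt
  · -- Perm: both sides are nodup with the same members
    rw [List.perm_ext_iff_of_nodup
      ((PySem.List.nodup_pyRange_one 0 p).filter _)
      (by
        apply List.Nodup.map_on
        · intro d1 h1 d2 h2 heq
          obtain ⟨b10, b11⟩ := pvQr_bounds p hp d1 (List.mem_filter.mp h1).1
          obtain ⟨b20, b21⟩ := pvQr_bounds p hp d2 (List.mem_filter.mp h2).1
          have h3 := pvInv p i d1 hp b10 b11
          rw [heq, pvInv p i d2 hp b20 b21] at h3
          omega
        · exact (pvQr_nodup p).filter _)]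
    intro x
    simp only [List.mem_filter, PySem.List.mem_pyRange_one, List.mem_map, pvCond,
      Bool.and_eq_true, bne_iff_ne, ne_eq, PySem.Set.contains_iff]
    constructor
    · rintro ⟨⟨hx0, hx1⟩, hxi, hmem⟩
      refine ⟨PySem.Int.mod (x - i) p, ⟨hmem, ?_⟩, pvFwd p i x hp hx0 hx1⟩
      intro h0
      exact hxi ((pvZeroIff p i x hp hx0 hx1 hi0 hi1).mp h0).symm
    · rintro ⟨d, ⟨hdq, hdne⟩, rfl⟩
      obtain ⟨hd0, hd1⟩ := pvQr_bounds p hp d hdq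
      have hinv := pvInv p i d hp hd0 hd1
      refine ⟨⟨PySem.Int.mod_nonneg _ hp, PySem.Int.mod_lt _ hp⟩, ?_, by rw [hinv]; exact hdq⟩
      intro h
      apply hdne
      rw [← h, sub_self] at hinv
      rw [← hinv, PySem.Int.mod_eq_emod_of_pos hp, Int.zero_emod]
  · exact (PySem.List.pairwise_lt_pyRange_one 0 p).filter _

-- base: strictly increasing, nodup, members are the nonzero residues
lemma pvBase_pairwise (p : Int) : (pvBase p).Pairwise (· < ·) := by
  have hle : (pvBase p).Pairwise (· ≤ ·) :=
    PySem.List.sorted_pairwise ((pvQr p).filter (fun d => d != 0)) (fun x => x)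
  have hnd : (pvBase p).Nodup :=
    ((pvQr_nodup p).filter _).perm
      (PySem.List.sorted_perm ((pvQr p).filter (fun d => d != 0)) (fun x => x) false).symm
  exact (hle.and hnd).imp (fun h => lt_of_le_of_ne h.1 h.2)

lemma pvBase_mem (p : Int) {d : Int} (hd : d ∈ pvBase p) : d ∈ pvQr p ∧ d ≠ 0 := by
  have := (PySem.List.mem_sorted (xs := (pvQr p).filter (fun d => d != 0))
    (key := fun x => x) (rev := false) (x := d)).mp hd
  have h2 := List.mem_filter.mp this
  exact ⟨h2.1, by simpa using h2.2⟩

-- B's wrapped-then-unwrapped row is the sorted shifted-residue row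
lemma pvRowB_eq_sorted (p i : Int) (hp : 0 < p) (hi0 : 0 ≤ i) (hi1 : i < p) :
    PySem.List.sorted
      ((((pvQr p).filter (fun d => d != 0)).map (fun d => PySem.Int.mod (i + d) p)))
      (fun x => x) false =
    ((pvBase p).filter (fun d => decide (p - i ≤ d))).map (fun d => d + i - p) ++
    ((pvBase p).filter (fun d => decide (d < p - i))).map (fun d => d + i) := by
  apply PySem.List.sorted_eq_of_perm_of_pairwise_lt
  · -- Perm
    have hshift1 : ∀ d ∈ (pvBase p).filter (fun d => decide (p - i ≤ d)),
        d + i - p = PySem.Int.mod (i + d) p := by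
      intro d hd
      obtain ⟨hmem, hcond⟩ := List.mem_filter.mp hd
      obtain ⟨hq, -⟩ := pvBase_mem p hmem
      obtain ⟨hd0, hd1⟩ := pvQr_bounds p hp d hq
      have hc : p - i ≤ d := by simpa using hcond
      rw [PySem.Int.mod_eq_emod_of_pos hp]
      have h : (i + d) % p = (i + d - p * 1) % p := by rw [Int.sub_mul_emod_self_left]
      rw [h, Int.emod_eq_of_lt (by omega) (by omega)]
      ring
    have hshift2 : ∀ d ∈ (pvBase p).filter (fun d => decide (d < p - i)),
        d + i = PySem.Int.mod (i + d) p := by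
      intro d hd
      obtain ⟨hmem, hcond⟩ := List.mem_filter.mp hd
      obtain ⟨hq, -⟩ := pvBase_mem p hmem
      obtain ⟨hd0, hd1⟩ := pvQr_bounds p hp d hq
      have hc : d < p - i := by simpa using hcond
      rw [PySem.Int.mod_eq_emod_of_pos hp, Int.emod_eq_of_lt (by omega) (by omega)]
      ring
    rw [List.map_congr_left hshift1, List.map_congr_left hshift2, ← List.map_append]
    have hfneg : (pvBase p).filter (fun d => decide (d < p - i)) =
        (pvBase p).filter (fun d => !(decide (p - i ≤ d))) := by
      apply List.filter_congr
      intro d _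
      rw [← decide_not]
      exact decide_eq_decide.mpr (by omega)
    rw [hfneg]
    exact ((List.filter_append_perm _ (pvBase p)).map _).trans
      ((PySem.List.sorted_perm ((pvQr p).filter (fun d => d != 0)) (fun x => x) false).map _)
  · -- strictly increasing
    rw [List.pairwise_append]
    have hmono1 : ∀ a b : Int, a < b → a + i - p < b + i - p := by intro a b h; omega
    have hmono2 : ∀ a b : Int, a < b → a + i < b + i := by intro a b h; omega
    refine ⟨((pvBase_pairwise p).filter _).map _ hmono1,
            ((pvBase_pairwise p).filter _).map _ hmono2, ?_⟩
    intro x hx y hy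
    obtain ⟨d1, hd1, rfl⟩ := List.mem_map.mp hx
    obtain ⟨d2, hd2, rfl⟩ := List.mem_map.mp hy
    obtain ⟨hm1, hc1⟩ := List.mem_filter.mp hd1
    obtain ⟨hm2, hc2⟩ := List.mem_filter.mp hd2
    obtain ⟨hq1, hne1⟩ := pvBase_mem p hm1
    obtain ⟨hq2, hne2⟩ := pvBase_mem p hm2
    obtain ⟨ha0, ha1⟩ := pvQr_bounds p hp d1 hq1
    obtain ⟨hb0, hb1⟩ := pvQr_bounds p hp d2 hq2
    have h1 : p - i ≤ d1 := by simpa using hc1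
    have h2 : (0:Int) < d2 := by
      have := (by simpa using hc2 : d2 < p - i); omega
    omega

lemma pvBaseB_eq (p : Int) : pvBaseB p = pvBase p := by
  unfold pvBaseB pvBase
  rw [pvQrB_eq]

lemma pvRowB_eq (p i : Int) (hp : 0 < p) (hi0 : 0 ≤ i) (hi1 : i < p) :
    pvRowB p i = pvRow p i := by
  unfold pvRowB
  rw [pvBaseB_eq, ← pvRowB_eq_sorted p i hp hi0 hi1, pvSortedRow_eq p i hp hi0 hi1]

-- the inner j-loop of A only rewrites row i
lemma pvInner (p : Int) (i : Int) (hi0 : 0 ≤ i) :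
    ∀ (L : List Int) (adj : List (List Int)), i.toNat < adj.length →
      (L.foldl (fun adj j =>
        if pvCond p i j then
          PySem.List.pySetD adj i (PySem.List.pyGetD adj i [] ++ [j])
        else adj) adj)
      = adj.set i.toNat
          (L.foldl (fun row j => if pvCond p i j then row ++ [j] else row)
            (adj.getD i.toNat [])) := by
  intro L
  induction L with
  | nil =>
    intro adj hlen
    simp only [List.foldl_nil]
    rw [List.getD_eq_getElem _ _ hlen, List.set_getElem_self]
  | cons j L ih =>
    intro adj hlen
    simp only [List.foldl_cons]
    by_cases hc : pvCond p i j
    · simp only [hc, if_true]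
      rw [PySem.List.pySetD_of_nonneg _ _ hi0, PySem.List.pyGetD_of_nonneg _ _ hi0]
      rw [ih _ (by simpa using hlen)]
      rw [List.set_set]
      congr 1
      rw [List.getD_eq_getElem _ _ (by simpa using hlen), List.getElem_set_self]
    · simp only [hc]
      exact ih adj hlen

-- the outer i-loop fills exactly the rows listed in L
lemma pvOuter (p : Int) :
    ∀ (L : List Int) (adj : List (List Int)), L.Nodup →
      (∀ x ∈ L, 0 ≤ x ∧ x.toNat < adj.length ∧ adj[x.toNat]? = some []) →
      ((L.foldl (fun adj i =>
        (PySem.List.pyRange 0 p 1).foldl (fun adj j =>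
          if pvCond p i j then
            PySem.List.pySetD adj i (PySem.List.pyGetD adj i [] ++ [j])
          else adj) adj) adj).length = adj.length ∧
      ∀ k : Nat,
        ((k : Int) ∈ L → (L.foldl (fun adj i =>
          (PySem.List.pyRange 0 p 1).foldl (fun adj j =>
            if pvCond p i j then
              PySem.List.pySetD adj i (PySem.List.pyGetD adj i [] ++ [j])
            else adj) adj) adj)[k]? = some (pvRow p (k : Int))) ∧
        ((k : Int) ∉ L → (L.foldl (fun adj i =>
          (PySem.List.pyRange 0 p 1).foldl (fun adj j =>
            if pvCond p i j then
              PySem.List.pySetD adj i (PySem.List.pyGetD adj i [] ++ [j])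
            else adj) adj) adj)[k]? = adj[k]?)) := by
  intro L
  induction L with
  | nil =>
    intro adj _ _
    exact ⟨rfl, fun k => ⟨fun h => absurd h (List.not_mem_nil), fun _ => rfl⟩⟩
  | cons i L ih =>
    intro adj hnd hyp
    obtain ⟨hi0, hilen, hinil⟩ := hyp i List.mem_cons_self
    simp only [List.foldl_cons]
    rw [pvInner p i hi0 _ adj hilen]
    set v : List Int := (PySem.List.pyRange 0 p 1).foldl
      (fun row j => if pvCond p i j then row ++ [j] else row) (adj.getD i.toNat []) with hv
    have hstart : adj.getD i.toNat [] = [] := by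
      rw [List.getD_eq_getElem?_getD, hinil]; rfl
    have hrow : v = pvRow p i := by
      rw [hv, hstart, PySem.List.foldl_append_if_eq_filter]
      simp [pvRow]
    have hnotin : i ∉ L := (List.nodup_cons.mp hnd).1
    have hyp' : ∀ x ∈ L, 0 ≤ x ∧ x.toNat < (adj.set i.toNat v).length ∧ (adj.set i.toNat v)[x.toNat]? = some [] := by
      intro x hx
      obtain ⟨hx0, hxlen, hxnil⟩ := hyp x (List.mem_cons_of_mem _ hx)
      refine ⟨hx0, by simpa using hxlen, ?_⟩
      rw [List.getElem?_set_ne (by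
        intro he
        exact hnotin (by
          have : x = i := by omega
          rwa [this] at hx))]
      exact hxnil
    obtain ⟨ihlen, ihk⟩ := ih (adj.set i.toNat v) (List.nodup_cons.mp hnd).2 hyp'
    refine ⟨by rw [ihlen]; simp, ?_⟩
    intro k
    constructor
    · intro hk
      rcases List.mem_cons.mp hk with he | hmem
      · have hki : k = i.toNat := by omega
        rw [(ihk k).2 (by rw [← he] at hnotin; exact hnotin)]
        rw [hki, List.getElem?_set_self (by simpa using hilen), hrow,
          Int.toNat_of_nonneg hi0]
      · exact (ihk k).1 hmem
    · intro hk
      rw [(ihk k).2 (fun h => hk (List.mem_cons_of_mem _ h))]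
      rw [List.getElem?_set_ne (by
        intro he
        exact hk (by
          have : (k : Int) = i := by omega
          rw [this]; exact List.mem_cons_self))]

lemma pvAdjA_eq (p : Int) : pvAdjA p = (PySem.List.pyRange 0 p 1).map (fun i => pvRow p i) := by
  unfold pvAdjA
  obtain ⟨hlen, hk⟩ := pvOuter p (PySem.List.pyRange 0 p 1)
    ((PySem.List.pyRange 0 p 1).map (fun _ => ([] : List Int)))
    (PySem.List.nodup_pyRange_one 0 p)
    (by
      intro x hx
      rw [PySem.List.mem_pyRange_one] at hx
      have hlen' : ((PySem.List.pyRange 0 p 1).map (fun _ => ([] : List Int))).length = (p - 0).toNat := by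
        rw [List.length_map, PySem.List.length_pyRange_one]
      refine ⟨hx.1, by omega, ?_⟩
      rw [List.getElem?_eq_getElem (by omega)]
      simp)
  apply List.ext_getElem?
  intro n
  by_cases hn : n < (p - 0).toNat
  · rw [(hk n).1 (by rw [PySem.List.mem_pyRange_one]; omega)]
    rw [List.getElem?_map, List.getElem?_eq_getElem (by rw [PySem.List.length_pyRange_one]; omega)]
    rw [PySem.List.getElem_pyRange_one]
    simp
  · have h1 : ((PySem.List.pyRange 0 p 1).map (fun i => pvRow p i)).length ≤ n := by
      rw [List.length_map, PySem.List.length_pyRange_one]; omega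
    rw [List.getElem?_eq_none h1, List.getElem?_eq_none (by
      rw [hlen, List.length_map, PySem.List.length_pyRange_one]; omega)]

-- ===== VERDICT (by name: the statement is the Claim_ definition above) =====
theorem paley_tournament_spec : Claim_equal_paley_tournament := by
  intro p _
  show paley_tournament p = paley_tournament_alt p
  rw [pvA_unfold, pvB_unfold, pvAdjA_eq, pvQrB_eq]
  refine Prod.ext ?_ rfl
  apply List.map_congr_left
  intro i hi
  rw [PySem.List.mem_pyRange_one] at hi
  exact (pvRowB_eq p i (by omega) hi.1 hi.2).symm
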